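-- pv_equiv track=rewrite | github.com/asccharania/learning | python/homework8.py | quicksum
-- ===== SOURCE A (Python) =====
-- def quicksum(line):
--     lst = []
--     lst.append(line)
--     product = []
--     for word in lst:
--         for letter in range(0,len(word)):
--             if word[letter] == ' ':
--                 continue
--             else:
--                 pos = letter + 1
--                 alph = ord(word[letter]) - ord('A') + 1
--                 product.append(pos*alph)
--                 qs = sum(product)
--     return qs
-- ===== SOURCE B (Python) =====
-- def quicksum(line):
--     total = 0
--     for i, ch in enumerate(line, 1):
--         if ch != ' ':
--             total += i * (ord(ch) - ord('A') + 1)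
--     return total
-- ===== Notes on version B (the rewrite author's own statement) =====
-- stated objective: faster
-- what changed: B keeps one running integer total updated per character instead of appending each term to a list and re-summing the whole list with sum(product) at every non-space character.
import Mathlib
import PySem

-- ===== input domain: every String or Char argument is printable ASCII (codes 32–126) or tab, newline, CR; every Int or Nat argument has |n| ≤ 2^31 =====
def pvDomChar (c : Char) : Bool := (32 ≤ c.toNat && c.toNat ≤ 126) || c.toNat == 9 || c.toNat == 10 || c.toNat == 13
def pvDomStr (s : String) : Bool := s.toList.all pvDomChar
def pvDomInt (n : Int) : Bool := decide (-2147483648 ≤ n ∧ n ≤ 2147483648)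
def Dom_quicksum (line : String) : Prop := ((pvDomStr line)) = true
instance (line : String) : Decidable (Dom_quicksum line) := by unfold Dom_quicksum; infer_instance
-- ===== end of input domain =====

-- B replaces A's append-then-re-sum list with a single running integer accumulator (faster, measured as asymptotic O(n^2) -> O(n)).


-- ===== PORT A =====
-- A's inner loop: position counter `letter`, list `product` of terms, `qs` re-set
-- to sum(product) at every non-space character (Option models the unbound `qs`).
def quicksumLoop (word : List Char) (letter : Nat) (product : List Int) (qs : Option Int) : Option Int :=
  match word with
  | [] => qs
  | c :: rest =>
    if c = ' ' then quicksumLoop rest (letter + 1) product qs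
    else
      let p := product ++ [((letter : Int) + 1) * ((c.toNat : Int) - 65 + 1)]
      quicksumLoop rest (letter + 1) p (some p.sum)

def quicksum (line : String) : Int :=
  (quicksumLoop line.toList 0 [] none).getD 0

-- ===== PORT B =====
-- B: one running accumulator, enumerate(line, 1).
def quicksumAltLoop (word : List Char) (i : Int) (total : Int) : Int :=
  match word with
  | [] => total
  | c :: rest =>
    quicksumAltLoop rest (i + 1) (if c = ' ' then total else total + i * ((c.toNat : Int) - 64))

def quicksum_alt (line : String) : Int :=
  quicksumAltLoop line.toList 1 0

-- ===== PRECONDITION & SPEC =====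
-- Pre_ excludes exactly the lines with no non-space character: there A never assigns qs and raises UnboundLocalError.
def Pre_quicksum (line : String) : Prop := line.toList.any (fun c => c ≠ ' ') = true
instance (line : String) : Decidable (Pre_quicksum line) := by unfold Pre_quicksum; infer_instance
def pvWitness_quicksum : String := "ACM"


def Spec_quicksum (line : String) (out : Int) : Prop := out = quicksum_alt line
instance (line : String) (out : Int) : Decidable (Spec_quicksum line out) := by unfold Spec_quicksum; infer_instance

-- ===== CLAIM (what is proved, stated in full; the proofs are below) =====
def Claim_equal_quicksum : Prop := ∀ (line : String), Dom_quicksum line → Pre_quicksum line → Spec_quicksum line (quicksum line)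

-- ===== LEMMAS AND PROOFS =====

-- Once qs carries the running sum of product, A's loop computes exactly B's loop.
theorem loop_agree (word : List Char) : ∀ (letter : Nat) (product : List Int),
    quicksumLoop word letter product (some product.sum)
      = some (quicksumAltLoop word ((letter : Int) + 1) product.sum) := by
  induction word with
  | nil => intro letter product; rfl
  | cons c rest ih =>
    intro letter product
    by_cases hc : c = ' '
    · simp only [quicksumLoop, quicksumAltLoop, hc]
      have := ih (letter + 1) product
      simpa [Nat.cast_add, add_assoc, add_comm, add_left_comm] using this
    · simp only [quicksumLoop, quicksumAltLoop, if_neg hc]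
      have := ih (letter + 1) (product ++ [((letter : Int) + 1) * ((c.toNat : Int) - 65 + 1)])
      rw [this]
      congr 1
      have hsum : (product ++ [((letter : Int) + 1) * ((c.toNat : Int) - 65 + 1)]).sum
          = product.sum + ((letter : Int) + 1) * ((c.toNat : Int) - 64) := by
        rw [List.sum_append, List.sum_cons, List.sum_nil]; ring
      rw [hsum]
      push_cast
      ring_nf

-- Before the first non-space character qs is still none; if any non-space exists the loop reaches it.
theorem loop_start (word : List Char) : ∀ (letter : Nat),
    word.any (fun c => c ≠ ' ') = true →
    quicksumLoop word letter [] none = some (quicksumAltLoop word ((letter : Int) + 1) 0) := by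
  induction word with
  | nil => intro _ h; simp at h
  | cons c rest ih =>
    intro letter h
    by_cases hc : c = ' '
    · simp only [quicksumLoop, quicksumAltLoop, hc]
      have hrest : rest.any (fun c => c ≠ ' ') = true := by
        simpa [hc] using h
      have := ih (letter + 1) hrest
      simpa [Nat.cast_add, add_assoc, add_comm, add_left_comm] using this
    · simp only [quicksumLoop, quicksumAltLoop, if_neg hc, List.nil_append]
      rw [loop_agree rest (letter + 1) [((letter : Int) + 1) * ((c.toNat : Int) - 65 + 1)]]
      have h1 : ((letter + 1 : Nat) : Int) + 1 = (letter : Int) + 1 + 1 := by push_cast; ring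
      have h2 : ([((letter : Int) + 1) * ((c.toNat : Int) - 65 + 1)] : List Int).sum
          = 0 + ((letter : Int) + 1) * ((c.toNat : Int) - 64) := by rw [List.sum_cons, List.sum_nil]; ring
      rw [h1, h2]

-- ===== VERDICT (by name: the statement is the Claim_ definition above) =====
theorem quicksum_spec : Claim_equal_quicksum := by
  intro line _ hpre
  unfold Spec_quicksum quicksum quicksum_alt
  rw [loop_start line.toList 0 hpre]
  simp
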